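-- pv_equiv track=rewrite | github.com/drovi-co/drovi | drovi-intelligence/src/api/routes/ask.py | _extract_source_names
-- ===== SOURCE A (Python) =====
-- from typing import Any, AsyncGenerator, Literal
--
-- def _extract_source_names(sources: list[dict[str, Any]]) -> list[str]:
--     names: list[str] = []
--     for source in sources:
--         name = source.get("name") or source.get("title")
--         if name and name not in names:
--             names.append(name)
--         if len(names) >= 5:
--             break
--     return names
-- ===== SOURCE B (Python) =====
-- def _extract_source_names(sources):
--     names = []
--     while len(names) < 5:
--         found = None
--         for source in sources:
--             candidate = source.get("name") or source.get("title")
--             if candidate and candidate not in names: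
--                 found = candidate
--                 break
--         if found is None:
--             break
--         names.append(found)
--     return names
-- ===== Notes on version B (the rewrite author's own statement) =====
-- stated objective: alternative
-- what changed: Replaces A's single accumulating pass (append-if-new, break at 5) by a selection algorithm: for each of up to 5 output slots, rescan the whole list from the start for the first truthy name not yet selected; correct because the k-th distinct truthy name in first-occurrence order is exactly the first one not among the previously selected k-1.
import Mathlib
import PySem

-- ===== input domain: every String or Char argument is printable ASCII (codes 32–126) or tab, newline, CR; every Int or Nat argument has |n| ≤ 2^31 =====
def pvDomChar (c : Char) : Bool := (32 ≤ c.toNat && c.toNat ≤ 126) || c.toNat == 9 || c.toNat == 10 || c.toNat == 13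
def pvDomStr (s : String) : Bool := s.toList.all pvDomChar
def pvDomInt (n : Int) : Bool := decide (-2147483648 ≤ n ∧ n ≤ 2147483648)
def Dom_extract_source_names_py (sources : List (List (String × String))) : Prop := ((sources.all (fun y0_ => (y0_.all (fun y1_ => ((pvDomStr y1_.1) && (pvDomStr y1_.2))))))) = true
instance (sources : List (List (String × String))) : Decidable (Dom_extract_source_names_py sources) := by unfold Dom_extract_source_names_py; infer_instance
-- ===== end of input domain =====

-- B replaces A's single accumulating pass (append-if-new, break at 5) by a selection algorithm:
-- for each of up to 5 output slots it rescans the whole list for the first truthy name not yet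
-- selected; objective: alternative (same result, different traversal shape).

-- shared by both ports: both Pythons compute `source.get("name") or source.get("title")`
def pvCand (source : List (String × String)) : Option String :=
  match PySem.Dict.get? ⟨source⟩ "name" with
  | some v => if v = "" then PySem.Dict.get? ⟨source⟩ "title" else some v
  | none => PySem.Dict.get? ⟨source⟩ "title"

-- ===== PORT A =====
-- the for-loop: state `names`; `if name and name not in names: append`; `if len(names) >= 5: break`
def pvLoopA : List (List (String × String)) → List String → List String
  | [], names => names
  | source :: rest, names =>
    let names1 :=
      match pvCand source with
      | some v => if v != "" && !names.contains v then names ++ [v] else names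
      | none => names
    if names1.length ≥ 5 then names1 else pvLoopA rest names1

def extract_source_names_py (sources : List (List (String × String))) : List String :=
  pvLoopA sources []

-- ===== PORT B =====
-- the inner `for source in sources: … if candidate and candidate not in names: found = candidate; break`
def pvFindNext (sources : List (List (String × String))) (names : List String) : Option String :=
  match sources with
  | [] => none
  | source :: rest =>
    match pvCand source with
    | some v => if v != "" && !names.contains v then some v else pvFindNext rest names
    | none => pvFindNext rest names

-- the `while len(names) < 5` loop: at most 5 iterations, one per appended name
def pvLoopB : Nat → List (List (String × String)) → List String → List String
  | 0, _, names => names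
  | k + 1, sources, names =>
    match pvFindNext sources names with
    | none => names
    | some v => pvLoopB k sources (names ++ [v])

def extract_source_names_py_alt (sources : List (List (String × String))) : List String :=
  pvLoopB 5 sources []

-- ===== PRECONDITION & SPEC =====
def Spec_extract_source_names_py (sources : List (List (String × String))) (out : List String) : Prop := out = extract_source_names_py_alt sources
instance (sources : List (List (String × String))) (out : List String) : Decidable (Spec_extract_source_names_py sources out) := by unfold Spec_extract_source_names_py; infer_instance

-- ===== CLAIM (what is proved, stated in full; the proofs are below) =====
def Claim_equal_extract_source_names_py : Prop := ∀ (sources : List (List (String × String))), Dom_extract_source_names_py sources → Spec_extract_source_names_py sources (extract_source_names_py sources)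

-- ===== LEMMAS AND PROOFS =====

-- the sequence of truthy candidates, shared intermediate of both proofs
def pvCands (sources : List (List (String × String))) : List String :=
  (sources.map pvCand).filterMap (fun c =>
    match c with
    | some v => if v = "" then none else some v
    | none => none)

-- a fold of Set.add only ever appends: the accumulator is a prefix of the result
theorem pv_foldl_add_prefix (xs : List String) (l : List String) :
    ∃ t, List.foldl PySem.Set.add l xs = l ++ t := by
  induction xs generalizing l with
  | nil => exact ⟨[], by simp⟩
  | cons x xs ih =>
    rw [List.foldl_cons]
    obtain ⟨t, ht⟩ := ih (PySem.Set.add l x)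
    by_cases hc : x ∈ l
    · exact ⟨t, by rw [ht]; simp [PySem.Set.add, hc]⟩
    · exact ⟨x :: t, by rw [ht]; simp [PySem.Set.add, hc]⟩

-- A-side invariant: with fewer than 5 names collected, A's remaining loop equals
-- folding Set.add over the remaining truthy candidates, then taking 5
theorem pv_loop_eq (sources : List (List (String × String))) :
    ∀ names : List String, names.length < 5 →
    pvLoopA sources names = (List.foldl PySem.Set.add names (pvCands sources)).take 5 := by
  induction sources with
  | nil =>
    intro names h
    simp [pvLoopA, pvCands, List.take_of_length_le (Nat.le_of_lt h)]
  | cons source rest ih =>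
    intro names h
    cases hc : pvCand source with
    | none =>
      simp only [pvLoopA, pvCands, List.map_cons, List.filterMap_cons, hc]
      rw [if_neg (by omega : ¬ names.length ≥ 5)]
      exact ih names h
    | some v =>
      by_cases hv : v = ""
      · subst hv
        simp only [pvLoopA, pvCands, List.map_cons, List.filterMap_cons, hc, bne_self_eq_false,
          Bool.false_and, Bool.false_eq_true, if_false, reduceIte]
        rw [if_neg (by omega : ¬ names.length ≥ 5)]
        exact ih names h
      · have hvb : (v != "") = true := by simpa using hv
        simp only [pvLoopA, pvCands, List.map_cons, List.filterMap_cons, hc, hvb, Bool.true_and,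
          if_neg hv, List.foldl_cons]
        by_cases hm : v ∈ names
        · -- duplicate: names unchanged, Set.add drops v too
          have hmc : names.contains v = true := by simpa using hm
          rw [hmc, Bool.not_true, if_neg Bool.false_ne_true,
            if_neg (by omega : ¬ names.length ≥ 5),
            show PySem.Set.add names v = names by simp [PySem.Set.add, hm]]
          exact ih names h
        · -- new truthy name: both sides append it
          have hmc : (!names.contains v) = true := by simpa using hm
          rw [hmc, if_pos rfl, show PySem.Set.add names v = names ++ [v] by
            simp [PySem.Set.add, hm]]
          by_cases h5 : (names ++ [v]).length ≥ 5
          · -- A breaks with exactly 5 names; the take 5 discards everything folded after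
            obtain ⟨t, ht⟩ := pv_foldl_add_prefix (pvCands rest) (names ++ [v])
            simp only [pvCands] at ht
            rw [if_pos h5, ht, List.take_append_of_le_length (by simp at h5 ⊢; omega),
              List.take_of_length_le (by simp; omega)]
          · rw [if_neg h5]
            exact ih (names ++ [v]) (by simp at h5 ⊢; omega)

-- B-side: the inner scan finding nothing / finding v, expressed on the Set.add fold
theorem pv_find_eq (sources : List (List (String × String))) (names : List String) :
    (pvFindNext sources names = none →
      List.foldl PySem.Set.add names (pvCands sources) = names) ∧
    (∀ v, pvFindNext sources names = some v →
      List.foldl PySem.Set.add names (pvCands sources) =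
        List.foldl PySem.Set.add (names ++ [v]) (pvCands sources)) := by
  induction sources with
  | nil => exact ⟨fun _ => by simp [pvCands], fun v h => by simp [pvFindNext] at h⟩
  | cons source rest ih =>
    cases hc : pvCand source with
    | none =>
      simp only [pvFindNext, pvCands, List.map_cons, List.filterMap_cons, hc]
      exact ih
    | some v =>
      by_cases hv : v = ""
      · subst hv
        simp only [pvFindNext, pvCands, List.map_cons, List.filterMap_cons, hc,
          bne_self_eq_false, Bool.false_and, Bool.false_eq_true, if_false, reduceIte]
        exact ih
      · have hvb : (v != "") = true := by simpa using hv
        by_cases hm : v ∈ names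
        · have hmc : names.contains v = true := by simpa using hm
          simp only [pvFindNext, pvCands, List.map_cons, List.filterMap_cons, hc, hvb, hmc,
            Bool.not_true, Bool.and_false, Bool.false_eq_true, if_false, if_neg hv,
            List.foldl_cons, show PySem.Set.add names v = names by simp [PySem.Set.add, hm]]
          constructor
          · exact ih.1
          · intro w hw
            rw [show PySem.Set.add (names ++ [w]) v = names ++ [w] by
              simp [PySem.Set.add, hm]]
            exact ih.2 w hw
        · have hmc : (!names.contains v) = true := by simpa using hm
          simp only [pvFindNext, pvCands, List.map_cons, List.filterMap_cons, hc, hvb, hmc,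
            Bool.true_and, if_neg hv, List.foldl_cons]
          refine ⟨fun h => by simp at h, fun w hw => ?_⟩
          obtain rfl : v = w := by simpa using hw
          rw [show PySem.Set.add names v = names ++ [v] by simp [PySem.Set.add, hm],
            show PySem.Set.add (names ++ [v]) v = names ++ [v] by simp [PySem.Set.add]]

-- B-side invariant: k remaining slots fill up to position names.length + k of the fold
theorem pv_loopB_eq (sources : List (List (String × String))) :
    ∀ (k : Nat) (names : List String),
    pvLoopB k sources names =
      (List.foldl PySem.Set.add names (pvCands sources)).take (names.length + k) := by
  intro k
  induction k with
  | zero =>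
    intro names
    obtain ⟨t, ht⟩ := pv_foldl_add_prefix (pvCands sources) names
    simp [pvLoopB, ht, List.take_append_of_le_length (le_refl names.length)]
  | succ k ih =>
    intro names
    cases hf : pvFindNext sources names with
    | none =>
      rw [show pvLoopB (k + 1) sources names = names by simp [pvLoopB, hf],
        (pv_find_eq sources names).1 hf,
        List.take_of_length_le (by omega)]
    | some v =>
      rw [show pvLoopB (k + 1) sources names = pvLoopB k sources (names ++ [v]) by
          simp [pvLoopB, hf],
        (pv_find_eq sources names).2 v hf, ih (names ++ [v])]
      congr 1
      simp; omega

-- ===== VERDICT (by name: the statement is the Claim_ definition above) =====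
theorem extract_source_names_py_spec : Claim_equal_extract_source_names_py := by
  intro sources _
  show extract_source_names_py sources = extract_source_names_py_alt sources
  rw [extract_source_names_py, extract_source_names_py_alt,
    pv_loop_eq sources [] (by simp), pv_loopB_eq sources 5 []]
  rfl
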